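-- pv_equiv track=rewrite | github.com/diegofurukawa/LotteryApp | manager_game.py | parse_favorite_numbers
-- ===== SOURCE A (Python) =====
-- from typing import List, Set
--
-- def parse_favorite_numbers(numbers_str: str) -> List[int]:
--     """
--     Parse favorite numbers from string input
--     Returns: List of valid numbers
--     """
--     try:
--         # Remove espaços e divide por vírgula ou espaço
--         numbers_str = numbers_str.replace(' ', ',')
--         numbers = []
--
--         for num_str in numbers_str.split(','):
--             if num_str.strip():
--                 num = int(num_str.strip())
--                 if 1 <= num <= 60:
--                     numbers.append(num)
--
--         return sorted(list(set(numbers)))  # Remove duplicates and sort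
--     except ValueError:
--         return []
-- ===== SOURCE B (Python) =====
-- def parse_favorite_numbers(numbers_str: str):
--     """
--     Parse favorite numbers from string input
--     Returns: List of valid numbers
--     """
--     tokens = [t.strip() for t in numbers_str.replace(' ', ',').split(',') if t.strip()]
--     try:
--         nums = {int(t) for t in tokens}
--     except ValueError:
--         return []
--     return [n for n in range(1, 61) if n in nums]
-- ===== Notes on version B (the rewrite author's own statement) =====
-- stated objective: alternative
-- what changed: B replaces A's single validate-and-append loop plus sorted(set(...)) by three staged passes: a comprehension that tokenizes and strips, one bulk set-comprehension conversion to ints (the only code inside try), and an ascending range(1,61) membership scan that does the range-filtering, dedup and sort in one bounded-domain pass.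
import Mathlib
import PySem

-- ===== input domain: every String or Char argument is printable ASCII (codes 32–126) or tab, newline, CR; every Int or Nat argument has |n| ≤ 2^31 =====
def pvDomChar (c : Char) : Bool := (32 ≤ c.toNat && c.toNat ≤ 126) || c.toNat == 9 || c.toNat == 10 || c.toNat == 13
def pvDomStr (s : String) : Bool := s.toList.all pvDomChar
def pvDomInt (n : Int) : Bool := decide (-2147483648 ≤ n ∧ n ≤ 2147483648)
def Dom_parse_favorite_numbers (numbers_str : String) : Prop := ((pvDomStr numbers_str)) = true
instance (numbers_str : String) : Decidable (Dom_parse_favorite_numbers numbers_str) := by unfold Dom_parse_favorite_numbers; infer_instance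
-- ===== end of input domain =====

-- B restructures A's validate-and-append loop + sorted(set(...)) into staged passes (tokenize, bulk int conversion into a set, ascending range-membership scan); equivalence of return values is proved.

-- ===== PORT A =====
-- the for-loop: accumulate valid numbers; none = ValueError escaped to the except branch
def pvA_go : List String → List Int → Option (List Int)
  | [], acc => some acc
  | t :: rest, acc =>
    if PySem.Str.strip t ≠ "" then
      match PySem.Int.ofStr? (PySem.Str.strip t) with
      | none => none
      | some n => pvA_go rest (if 1 ≤ n ∧ n ≤ 60 then acc ++ [n] else acc)
    else pvA_go rest acc

def parse_favorite_numbers (numbers_str : String) : List Int :=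
  let tokens := (PySem.Str.split? (PySem.Str.replace numbers_str " " ",") ",").getD []
  match pvA_go tokens [] with
  | some nums => PySem.List.sorted (PySem.Set.ofList nums) (fun x => x) false
  | none => []

-- ===== PORT B =====
-- the set comprehension {int(t) for t in tokens}; none = ValueError at the first bad token
def pvB_conv : List String → PySem.Set Int → Option (PySem.Set Int)
  | [], s => some s
  | t :: rest, s =>
    match PySem.Int.ofStr? t with
    | none => none
    | some n => pvB_conv rest (PySem.Set.add s n)

def parse_favorite_numbers_alt (numbers_str : String) : List Int :=
  let tokens := (((PySem.Str.split? (PySem.Str.replace numbers_str " " ",") ",").getD []).filter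
      (fun t => PySem.Str.strip t ≠ "")).map PySem.Str.strip
  match pvB_conv tokens PySem.Set.empty with
  | some nums => (PySem.List.pyRange 1 61 1).filter (fun n => PySem.Set.contains nums n)
  | none => []

-- ===== PRECONDITION & SPEC =====
def Spec_parse_favorite_numbers (numbers_str : String) (out : List Int) : Prop := out = parse_favorite_numbers_alt numbers_str
instance (numbers_str : String) (out : List Int) : Decidable (Spec_parse_favorite_numbers numbers_str out) := by unfold Spec_parse_favorite_numbers; infer_instance

-- ===== CLAIM (what is proved, stated in full; the proofs are below) =====
def Claim_equal_parse_favorite_numbers : Prop := ∀ (numbers_str : String), Dom_parse_favorite_numbers numbers_str → Spec_parse_favorite_numbers numbers_str (parse_favorite_numbers numbers_str)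

-- ===== LEMMAS AND PROOFS =====

-- invariant tying A's in-range accumulator to B's set of all converted numbers
def pvInv (acc : List Int) (s : PySem.Set Int) : Prop :=
  (∀ n ∈ acc, 1 ≤ n ∧ n ≤ 60) ∧ ∀ i : Int, 1 ≤ i → i ≤ 60 → (i ∈ s ↔ i ∈ acc)

lemma pvInv_init : pvInv [] PySem.Set.empty := by
  refine ⟨by simp, by intro i _ _; simp [PySem.Set.empty]⟩

lemma pvInv_step (acc : List Int) (s : PySem.Set Int) (n : Int) (h : pvInv acc s) :
    pvInv (if 1 ≤ n ∧ n ≤ 60 then acc ++ [n] else acc) (PySem.Set.add s n) := by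
  obtain ⟨hrng, hmem⟩ := h
  by_cases hr : 1 ≤ n ∧ n ≤ 60
  · rw [if_pos hr]
    refine ⟨?_, ?_⟩
    · intro m hm; rcases List.mem_append.1 hm with hm | hm
      · exact hrng m hm
      · simp at hm; omega
    · intro i h1 h2
      rw [PySem.Set.mem_add, List.mem_append, hmem i h1 h2]
      simp
  · rw [if_neg hr]
    refine ⟨hrng, ?_⟩
    intro i h1 h2
    rw [PySem.Set.mem_add, hmem i h1 h2]
    constructor
    · rintro (h | rfl)
      · exact h
      · omega
    · exact Or.inl

-- the two passes run in lockstep over the same tokens: both raise, or the results stay related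
lemma pvGo_lockstep : ∀ (ts : List String) (acc : List Int) (s : PySem.Set Int),
    pvInv acc s →
    (pvA_go ts acc = none ∧
      pvB_conv ((ts.filter (fun t => PySem.Str.strip t ≠ "")).map PySem.Str.strip) s = none) ∨
    (∃ acc' s', pvA_go ts acc = some acc' ∧
      pvB_conv ((ts.filter (fun t => PySem.Str.strip t ≠ "")).map PySem.Str.strip) s = some s' ∧
      pvInv acc' s') := by
  intro ts
  induction ts with
  | nil => intro acc s h; exact Or.inr ⟨acc, s, rfl, rfl, h⟩
  | cons t rest ih =>
    intro acc s h
    by_cases hs : PySem.Str.strip t ≠ ""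
    · cases hv : PySem.Int.ofStr? (PySem.Str.strip t) with
      | none =>
        exact Or.inl ⟨by simp [pvA_go, hs, hv], by simp [hs, pvB_conv, hv]⟩
      | some n =>
        have h' := pvInv_step acc s n h
        rcases ih _ _ h' with ⟨ha, hb⟩ | ⟨a', s', ha, hb, hinv⟩
        · exact Or.inl ⟨by simp [pvA_go, hs, hv]; exact ha, by simp [hs, pvB_conv, hv]; simpa using hb⟩
        · exact Or.inr ⟨a', s', by simp [pvA_go, hs, hv]; exact ha, by simp [hs, pvB_conv, hv]; simpa using hb, hinv⟩
    · rcases ih acc s h with ⟨ha, hb⟩ | ⟨a', s', ha, hb, hinv⟩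
      · exact Or.inl ⟨by simp [pvA_go, hs]; exact ha, by simp [hs]; simpa using hb⟩
      · exact Or.inr ⟨a', s', by simp [pvA_go, hs]; exact ha, by simp [hs]; simpa using hb, hinv⟩

-- the final reads agree: sorted(set(nums)) is the ascending membership scan of range(1,61)
lemma pvFinal (nums : List Int) (s : PySem.Set Int) (h : pvInv nums s) :
    PySem.List.sorted (PySem.Set.ofList nums) (fun x => x) false
      = (PySem.List.pyRange 1 61 1).filter (fun n => PySem.Set.contains s n) := by
  obtain ⟨hrng, hmem⟩ := h
  apply PySem.List.sorted_eq_of_perm_of_pairwise_lt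
  · apply (List.perm_ext_iff_of_nodup ?_ (PySem.Set.nodup_ofList nums)).2
    · intro i
      rw [List.mem_filter, PySem.Set.mem_ofList, PySem.List.mem_pyRange_one]
      constructor
      · rintro ⟨⟨hi1, hi2⟩, hget⟩
        exact (hmem i hi1 (by omega)).1 (by simpa [PySem.Set.contains] using hget)
      · intro hi
        have hr := hrng i hi
        exact ⟨⟨hr.1, by omega⟩, by simpa [PySem.Set.contains] using (hmem i hr.1 hr.2).2 hi⟩
    · exact (PySem.List.nodup_pyRange_one 1 61).filter _
  · exact (PySem.List.pairwise_lt_pyRange_one 1 61).filter _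

-- ===== VERDICT (by name: the statement is the Claim_ definition above) =====
theorem parse_favorite_numbers_spec : Claim_equal_parse_favorite_numbers := by
  intro str _
  unfold Spec_parse_favorite_numbers parse_favorite_numbers parse_favorite_numbers_alt
  rcases pvGo_lockstep ((PySem.Str.split? (PySem.Str.replace str " " ",") ",").getD []) [] PySem.Set.empty pvInv_init with ⟨ha, hb⟩ | ⟨a', s', ha, hb, hinv⟩
  · simp only [ha, hb]
  · simp only [ha, hb]
    exact pvFinal a' s' hinv
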